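-- pv_equiv track=rewrite | github.com/jokajak/advent_of_code | src/aoc/y2023/d14.py | find_repeating_interval
-- ===== SOURCE A (Python) =====
-- def find_repeating_interval(data):
--     seen_counts = {}
--     repeating_interval = None
--
--     for i, (value, count) in enumerate(data):
--         if value not in seen_counts:
--             seen_counts[value] = (count, i)
--         else:
--             prev_count, prev_index = seen_counts[value]
--             if count == prev_count and repeating_interval is None:
--                 repeating_interval = i - prev_index
--                 break
--
--     return repeating_interval
-- ===== SOURCE B (Python) =====
-- def find_repeating_interval(data):
--     data = list(data)
--     first_occ = {}
--     for i, (value, count) in enumerate(data):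
--         if value not in first_occ:
--             first_occ[value] = (count, i)
--     for i, (value, count) in enumerate(data):
--         fc, fi = first_occ[value]
--         if fi < i and fc == count:
--             return i - fi
--     return None
-- ===== Notes on version B (the rewrite author's own statement) =====
-- stated objective: alternative
-- what changed: B splits A's single interleaved loop-with-break into two passes: one pass builds a first-occurrence table over all of data, then a second enumerate pass finds the first genuine repeat (first index strictly smaller, equal count).
import Mathlib
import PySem

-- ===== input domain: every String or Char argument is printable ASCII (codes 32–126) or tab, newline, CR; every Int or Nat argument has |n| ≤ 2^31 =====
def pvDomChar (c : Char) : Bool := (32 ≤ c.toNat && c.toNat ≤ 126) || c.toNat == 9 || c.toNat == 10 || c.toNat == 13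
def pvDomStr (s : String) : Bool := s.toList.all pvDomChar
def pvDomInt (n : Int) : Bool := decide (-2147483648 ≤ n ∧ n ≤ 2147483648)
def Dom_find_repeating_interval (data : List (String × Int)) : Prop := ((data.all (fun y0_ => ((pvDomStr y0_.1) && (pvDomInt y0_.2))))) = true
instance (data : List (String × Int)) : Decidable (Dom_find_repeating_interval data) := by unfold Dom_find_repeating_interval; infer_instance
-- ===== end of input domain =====

-- B replaces A's single loop-with-break by two passes: build a first-occurrence table, then scan for the first genuine repeat (alternative decomposition, same cost).

-- ===== PORT A =====
-- the for-loop with early break, carrying A's seen_counts dict and the running index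
def pvFindA (seen : PySem.Dict String (Int × Int)) (i : Int) :
    List (String × Int) → Option Int
  | [] => none
  | (value, count) :: rest =>
    match seen.get? value with
    | none => pvFindA (seen.insert value (count, i)) (i + 1) rest
    | some (prev_count, prev_index) =>
      if count = prev_count then some (i - prev_index)
      else pvFindA seen (i + 1) rest

def find_repeating_interval (data : List (String × Int)) : Option Int :=
  pvFindA PySem.Dict.empty 0 data

-- ===== PORT B =====
-- first pass: first_occ[value] = (count, index of first occurrence)
def pvBuildFirst (d : PySem.Dict String (Int × Int)) (i : Int) :
    List (String × Int) → PySem.Dict String (Int × Int)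
  | [] => d
  | (value, count) :: rest =>
    pvBuildFirst (if (d.get? value).isSome then d else d.insert value (count, i)) (i + 1) rest

-- second pass: first i whose value was first seen strictly earlier with the same count
def pvScanB (first : PySem.Dict String (Int × Int)) (i : Int) :
    List (String × Int) → Option Int
  | [] => none
  | (value, count) :: rest =>
    match first.get? value with
    | some (fc, fi) =>
      if fi < i ∧ fc = count then some (i - fi) else pvScanB first (i + 1) rest
    | none => pvScanB first (i + 1) rest

def find_repeating_interval_alt (data : List (String × Int)) : Option Int :=
  pvScanB (pvBuildFirst PySem.Dict.empty 0 data) 0 data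

-- ===== PRECONDITION & SPEC =====
def Spec_find_repeating_interval (data : List (String × Int)) (out : Option Int) : Prop := out = find_repeating_interval_alt data
instance (data : List (String × Int)) (out : Option Int) : Decidable (Spec_find_repeating_interval data out) := by unfold Spec_find_repeating_interval; infer_instance

-- ===== CLAIM (what is proved, stated in full; the proofs are below) =====
def Claim_equal_find_repeating_interval : Prop := ∀ (data : List (String × Int)), Dom_find_repeating_interval data → Spec_find_repeating_interval data (find_repeating_interval data)

-- ===== LEMMAS AND PROOFS =====

-- building the table never disturbs an entry that is already present
theorem pvBuildFirst_get?_of_some (l : List (String × Int)) (d : PySem.Dict String (Int × Int))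
    (i : Int) (v : String) (e : Int × Int) (h : d.get? v = some e) :
    (pvBuildFirst d i l).get? v = some e := by
  induction l generalizing d i with
  | nil => simpa [pvBuildFirst] using h
  | cons p rest ih =>
    obtain ⟨w, c⟩ := p
    simp only [pvBuildFirst]
    apply ih
    by_cases hw : (d.get? w).isSome
    · simpa [hw] using h
    · by_cases hvw : v = w
      · subst hvw; simp [h] at hw
      · simpa [hw, PySem.Dict.get?_insert, hvw] using h

-- loop invariant: A's scan with dict `seen` equals B's scan over the completed table,
-- provided every entry of `seen` carries an index < i
theorem pvFindA_eq_scan (l : List (String × Int)) (seen : PySem.Dict String (Int × Int))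
    (i : Int) (H : ∀ v e, seen.get? v = some e → e.2 < i) :
    pvFindA seen i l = pvScanB (pvBuildFirst seen i l) i l := by
  induction l generalizing seen i with
  | nil => simp [pvFindA, pvScanB]
  | cons p rest ih =>
    obtain ⟨v, c⟩ := p
    simp only [pvFindA, pvBuildFirst, pvScanB]
    cases hv : seen.get? v with
    | none =>
      have hins : ((seen.insert v (c, i)).get? v) = some (c, i) :=
        PySem.Dict.get?_insert_self seen v (c, i)
      have hfull : (pvBuildFirst (seen.insert v (c, i)) (i + 1) rest).get? v = some (c, i) :=
        pvBuildFirst_get?_of_some _ _ _ _ _ hins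
      have H' : ∀ w e, (seen.insert v (c, i)).get? w = some e → e.2 < i + 1 := by
        intro w e hw
        by_cases hwv : w = v
        · subst hwv
          rw [PySem.Dict.get?_insert_self] at hw
          cases hw; simp
        · rw [PySem.Dict.get?_insert, if_neg hwv] at hw
          have := H w e hw; omega
      simp only [Option.isSome_none, Bool.false_eq_true, if_false, hfull]
      rw [ih _ _ H']
      simp
    | some e =>
      obtain ⟨pc, pi⟩ := e
      have hlt : pi < i := H v (pc, pi) hv
      have hfull : (pvBuildFirst seen (i + 1) rest).get? v = some (pc, pi) :=
        pvBuildFirst_get?_of_some _ _ _ _ _ hv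
      simp only [Option.isSome_some, if_true, hfull]
      by_cases hc : c = pc
      · subst hc; simp [hlt]
      · have H' : ∀ w e, seen.get? w = some e → e.2 < i + 1 := by
          intro w e hw; have := H w e hw; omega
        rw [ih _ _ H', if_neg hc, if_neg (fun h => hc h.2.symm)]

-- ===== VERDICT (by name: the statement is the Claim_ definition above) =====
theorem find_repeating_interval_spec : Claim_equal_find_repeating_interval := by
  intro data _
  unfold Spec_find_repeating_interval find_repeating_interval find_repeating_interval_alt
  exact pvFindA_eq_scan data PySem.Dict.empty 0 (by intro v e h; simp [PySem.Dict.get?_empty] at h)
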